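-- pv_equiv track=rewrite | github.com/jiraroj-wir/MUIC-ICCS101-Introduction-to-Programming | a6/eto.py | eto
-- ===== SOURCE A (Python) =====
-- def eto(lst: list[int]) -> list[int]:
--     if len(lst) == 0:
--         return []
--     head = lst[0]
--     tail = lst[1:]
--
--     if (head & 1) == 0:
--         return [head] + eto(tail)
--     else:
--         return eto(tail) + [head]
-- ===== SOURCE B (Python) =====
-- def eto(lst: list[int]) -> list[int]:
--     evens = []
--     odds = []
--     for x in lst:
--         if (x & 1) == 0:
--             evens.append(x)
--         else:
--             odds.append(x)
--     return evens + odds[::-1]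
-- ===== Notes on version B (the rewrite author's own statement) =====
-- stated objective: faster
-- what changed: Replaces A's recursion (which concatenates [head]+rec or rec+[head] at every level, quadratic list copying) with a single iterative forward pass into two accumulator lists returned as evens + odds[::-1].
import Mathlib
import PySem

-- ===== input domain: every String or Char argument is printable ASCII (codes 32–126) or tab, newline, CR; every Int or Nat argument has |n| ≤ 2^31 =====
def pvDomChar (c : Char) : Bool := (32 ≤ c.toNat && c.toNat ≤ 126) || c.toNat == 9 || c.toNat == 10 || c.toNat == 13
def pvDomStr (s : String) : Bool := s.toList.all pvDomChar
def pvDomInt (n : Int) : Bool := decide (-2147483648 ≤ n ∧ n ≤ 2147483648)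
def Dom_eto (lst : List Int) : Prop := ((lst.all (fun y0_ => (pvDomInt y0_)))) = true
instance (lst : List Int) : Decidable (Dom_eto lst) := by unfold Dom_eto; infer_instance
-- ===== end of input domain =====

-- B replaces A's recursion (quadratic list concatenation) with one forward pass into two
-- accumulator lists, returning evens ++ reverse odds; measurably faster (asymptotic).


-- parity helper shared by both ports: Python's `(x & 1) == 0`; x & 1 is the low bit,
-- which is 0 exactly when x % 2 == 0 (Python floor-mod) — exact on all ints.
def pvEven (x : Int) : Bool := PySem.Int.mod x 2 == 0

-- ===== PORT A =====
-- recursion on the list: even head prepended, odd head appended after the recursive call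
def eto (lst : List Int) : List Int :=
  match lst with
  | [] => []
  | head :: tail =>
      if pvEven head then [head] ++ eto tail
      else eto tail ++ [head]

-- ===== PORT B =====
-- the for-loop of Source B: state is the pair (evens, odds), each element appended to one side
def etoLoop (lst : List Int) (evens odds : List Int) : List Int × List Int :=
  match lst with
  | [] => (evens, odds)
  | x :: t =>
      if pvEven x then etoLoop t (evens ++ [x]) odds
      else etoLoop t evens (odds ++ [x])

def eto_alt (lst : List Int) : List Int :=
  let (evens, odds) := etoLoop lst [] []
  evens ++ odds.reverse      -- odds[::-1]

-- ===== PRECONDITION & SPEC =====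
def Spec_eto (lst : List Int) (out : List Int) : Prop := out = eto_alt lst
instance (lst : List Int) (out : List Int) : Decidable (Spec_eto lst out) := by unfold Spec_eto; infer_instance

-- ===== CLAIM (what is proved, stated in full; the proofs are below) =====
def Claim_equal_eto : Prop := ∀ (lst : List Int), Dom_eto lst → Spec_eto lst (eto lst)

-- ===== LEMMAS AND PROOFS =====
theorem etoLoop_spec (lst evens odds : List Int) :
    etoLoop lst evens odds =
      (evens ++ lst.filter (fun x => pvEven x),
       odds ++ lst.filter (fun x => !(pvEven x))) := by
  induction lst generalizing evens odds with
  | nil => simp [etoLoop]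
  | cons h t ih =>
      by_cases hp : pvEven h = true
      · simp [etoLoop, hp, ih]
      · simp only [Bool.not_eq_true] at hp
        simp [etoLoop, hp, ih]

theorem eto_closed (lst : List Int) :
    eto lst = lst.filter (fun x => pvEven x) ++
              (lst.filter (fun x => !(pvEven x))).reverse := by
  induction lst with
  | nil => simp [eto]
  | cons h t ih =>
      by_cases hp : pvEven h = true
      · simp [eto, hp, ih]
      · simp only [Bool.not_eq_true] at hp
        simp [eto, hp, ih]

-- ===== VERDICT (by name: the statement is the Claim_ definition above) =====
theorem eto_spec : Claim_equal_eto := by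
  intro lst _
  unfold Spec_eto eto_alt
  rw [etoLoop_spec, eto_closed]
  simp
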